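-- pv_equiv track=rewrite | github.com/alikallel/A-K-Cipher | ROT/rot.py | rot_bruteforce
-- ===== SOURCE A (Python) =====
-- def rot_bruteforce(text):
--     results = []
--     for shift in range(26):
--         decrypted = ""
--         for char in text:
--             if char.isalpha():
--                 base = ord('A') if char.isupper() else ord('a')
--                 decrypted += chr((ord(char) - base - shift) % 26 + base)
--             else:
--                 decrypted += char
--         results.append((shift, decrypted))
--     return results
-- ===== SOURCE B (Python) =====
-- def rot_bruteforce(text):
--     # Recursive incremental descent: each shift's line is one ROT(-1) step
--     # applied to the previous line; the result list is built by cons on return.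
--     def rot1(ch):
--         if ch.isalpha():
--             base = ord('A') if ch.isupper() else ord('a')
--             return chr((ord(ch) - base - 1) % 26 + base)
--         return ch
--
--     def go(shift, current):
--         if shift == 26:
--             return []
--         return [(shift, current)] + go(shift + 1, ''.join(map(rot1, current)))
--
--     return go(0, text)
-- ===== Notes on version B (the rewrite author's own statement) =====
-- stated objective: alternative
-- what changed: B replaces A's two nested imperative loops (26 independent passes each recomputing (ord(c)-base-shift)%26 from the original text, appending to an accumulator) by a recursive descent that builds the list by cons and derives each line from the previous one with a single ROT(-1) map.
import Mathlib
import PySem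

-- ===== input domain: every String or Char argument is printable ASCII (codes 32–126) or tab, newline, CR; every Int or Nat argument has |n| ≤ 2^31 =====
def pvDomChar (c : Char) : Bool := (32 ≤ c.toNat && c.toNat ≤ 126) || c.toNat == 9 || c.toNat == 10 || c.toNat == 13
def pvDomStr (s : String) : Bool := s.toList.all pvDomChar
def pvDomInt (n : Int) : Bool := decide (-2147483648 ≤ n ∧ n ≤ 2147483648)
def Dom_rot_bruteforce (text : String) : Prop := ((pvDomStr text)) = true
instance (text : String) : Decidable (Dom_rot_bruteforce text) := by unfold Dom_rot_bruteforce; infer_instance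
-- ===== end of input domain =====

-- B is a recursive incremental descent (cons-built list, each line = ROT(-1) of the previous)
-- instead of A's 26 independent passes over the original text.

-- ===== PORT A =====
-- one character of A's inner loop: chr((ord(char) - base - shift) % 26 + base) on letters
def pvDecCharA (shift : Int) (c : Char) : Char :=
  if PySem.Chars.isalpha c then
    let base : Int := if PySem.Chars.isupper c then 65 else 97
    Char.ofNat (PySem.Int.mod ((c.toNat : Int) - base - shift) 26 + base).toNat
  else c

def rot_bruteforce (text : String) : List (Int × String) :=
  (PySem.List.pyRange 0 26 1).foldl
    (fun results shift =>
      results ++ [(shift,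
        String.ofList (text.toList.foldl (fun acc c => acc ++ [pvDecCharA shift c]) []))])
    []

-- ===== PORT B =====
-- one ROT(-1) step on a character, re-deriving base from the current character
def pvRot1 (c : Char) : Char :=
  if PySem.Chars.isalpha c then
    let base : Int := if PySem.Chars.isupper c then 65 else 97
    Char.ofNat (PySem.Int.mod ((c.toNat : Int) - base - 1) 26 + base).toNat
  else c

-- Source B's `go(shift, current)`: recursion counted by the remaining shifts (fuel = 26 - shift)
def pvGo : Nat → Int → List Char → List (Int × String)
  | 0, _, _ => []
  | n + 1, shift, cur => (shift, String.ofList cur) :: pvGo n (shift + 1) (cur.map pvRot1)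

def rot_bruteforce_alt (text : String) : List (Int × String) :=
  pvGo 26 0 text.toList

-- ===== PRECONDITION & SPEC =====
def Spec_rot_bruteforce (text : String) (out : List (Int × String)) : Prop := out = rot_bruteforce_alt text
instance (text : String) (out : List (Int × String)) : Decidable (Spec_rot_bruteforce text out) := by unfold Spec_rot_bruteforce; infer_instance

-- ===== CLAIM (what is proved, stated in full; the proofs are below) =====
def Claim_equal_rot_bruteforce : Prop := ∀ (text : String), Dom_rot_bruteforce text → Spec_rot_bruteforce text (rot_bruteforce text)

-- ===== LEMMAS AND PROOFS =====

theorem pvCharLe {a c : Char} : a ≤ c ↔ a.toNat ≤ c.toNat :=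
  ⟨fun h => UInt32.le_iff_toNat_le.mp (Char.le_def.mp h),
   fun h => Char.le_def.mpr (UInt32.le_iff_toNat_le.mpr h)⟩

theorem pvOfNat_toNat {m : Nat} (h : m < 256) : (Char.ofNat m).toNat = m := by
  rw [Char.ofNat, dif_pos (Or.inl (by omega))]; rfl

-- an ASCII-alpha character is a letter of exactly one case, with its code bounds
theorem pvAlphaCases {c : Char} (h : PySem.Chars.isalpha c = true) :
    (PySem.Chars.isupper c = true ∧ 65 ≤ c.toNat ∧ c.toNat ≤ 90) ∨
    (PySem.Chars.isupper c = false ∧ 97 ≤ c.toNat ∧ c.toNat ≤ 122) := by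
  simp only [PySem.Chars.isalpha, Bool.or_eq_true] at h
  cases hu : PySem.Chars.isupper c
  · right
    refine ⟨rfl, ?_⟩
    have hl : PySem.Chars.islower c = true := by
      rcases h with h | h
      · rw [hu] at h; exact absurd h (by simp)
      · exact h
    simp only [PySem.Chars.islower, Bool.and_eq_true, decide_eq_true_eq] at hl
    exact ⟨pvCharLe.mp hl.1, pvCharLe.mp hl.2⟩
  · left
    have hu' : PySem.Chars.isupper c = true := hu
    simp only [PySem.Chars.isupper, Bool.and_eq_true, decide_eq_true_eq] at hu'
    exact ⟨rfl, pvCharLe.mp hu'.1, pvCharLe.mp hu'.2⟩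

-- shift 0 leaves every character unchanged
theorem pvDecCharA_zero (c : Char) : pvDecCharA 0 c = c := by
  by_cases h : PySem.Chars.isalpha c = true
  · rcases pvAlphaCases h with ⟨hu, hl, hr⟩ | ⟨hu, hl, hr⟩
    · simp only [pvDecCharA, h, hu, if_true,
        PySem.Int.mod_eq_emod_of_pos (show (0:Int) < 26 by norm_num)]
      have hm : (((c.toNat : Int) - 65 - 0) % 26 + 65).toNat = c.toNat := by omega
      rw [hm, Char.ofNat_toNat]
    · simp only [pvDecCharA, h, hu, if_true, if_false, Bool.false_eq_true,
        PySem.Int.mod_eq_emod_of_pos (show (0:Int) < 26 by norm_num)]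
      have hm : (((c.toNat : Int) - 97 - 0) % 26 + 97).toNat = c.toNat := by omega
      rw [hm, Char.ofNat_toNat]
  · have hna : PySem.Chars.isalpha c = false := by
      cases hx : PySem.Chars.isalpha c
      · rfl
      · exact absurd hx h
    simp [pvDecCharA, hna]

-- one extra ROT(-1) step advances A's shift by one
theorem pvRot1_decCharA (shift : Int) (c : Char) :
    pvRot1 (pvDecCharA shift c) = pvDecCharA (shift + 1) c := by
  by_cases h : PySem.Chars.isalpha c = true
  · rcases pvAlphaCases h with ⟨hu, hl, hr⟩ | ⟨hu, hl, hr⟩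
    · -- uppercase
      have hA : pvDecCharA shift c = Char.ofNat (((c.toNat : Int) - 65 - shift) % 26 + 65).toNat := by
        simp only [pvDecCharA, h, hu, if_true,
          PySem.Int.mod_eq_emod_of_pos (show (0:Int) < 26 by norm_num)]
      have hA' : pvDecCharA (shift+1) c = Char.ofNat (((c.toNat : Int) - 65 - (shift+1)) % 26 + 65).toNat := by
        simp only [pvDecCharA, h, hu, if_true,
          PySem.Int.mod_eq_emod_of_pos (show (0:Int) < 26 by norm_num)]
      set r : Int := ((c.toNat : Int) - 65 - shift) % 26 with hrdef
      have hr0 : 0 ≤ r := Int.emod_nonneg _ (by norm_num)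
      have hr26 : r < 26 := Int.emod_lt_of_pos _ (by norm_num)
      set m : Nat := (r + 65).toNat with hm
      have hmb : 65 ≤ m ∧ m ≤ 90 := by omega
      have hd : (Char.ofNat m).toNat = m := pvOfNat_toNat (by omega)
      have hup : PySem.Chars.isupper (Char.ofNat m) = true := by
        simp only [PySem.Chars.isupper, Bool.and_eq_true, decide_eq_true_eq]
        exact ⟨pvCharLe.mpr (by rw [hd]; exact hmb.1), pvCharLe.mpr (by rw [hd]; exact hmb.2)⟩
      have hal : PySem.Chars.isalpha (Char.ofNat m) = true := by
        simp [PySem.Chars.isalpha, hup]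
      rw [hA, hA']
      show pvRot1 (Char.ofNat m) = _
      simp only [pvRot1, hal, hup, if_true, hd,
        PySem.Int.mod_eq_emod_of_pos (show (0:Int) < 26 by norm_num)]
      congr 1
      have hmi : (m : Int) = r + 65 := by omega
      rw [hmi]
      omega
    · -- lowercase
      have hA : pvDecCharA shift c = Char.ofNat (((c.toNat : Int) - 97 - shift) % 26 + 97).toNat := by
        simp only [pvDecCharA, h, hu, if_true, if_false, Bool.false_eq_true,
          PySem.Int.mod_eq_emod_of_pos (show (0:Int) < 26 by norm_num)]
      have hA' : pvDecCharA (shift+1) c = Char.ofNat (((c.toNat : Int) - 97 - (shift+1)) % 26 + 97).toNat := by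
        simp only [pvDecCharA, h, hu, if_true, if_false, Bool.false_eq_true,
          PySem.Int.mod_eq_emod_of_pos (show (0:Int) < 26 by norm_num)]
      set r : Int := ((c.toNat : Int) - 97 - shift) % 26 with hrdef
      have hr0 : 0 ≤ r := Int.emod_nonneg _ (by norm_num)
      have hr26 : r < 26 := Int.emod_lt_of_pos _ (by norm_num)
      set m : Nat := (r + 97).toNat with hm
      have hmb : 97 ≤ m ∧ m ≤ 122 := by omega
      have hd : (Char.ofNat m).toNat = m := pvOfNat_toNat (by omega)
      have hup : PySem.Chars.isupper (Char.ofNat m) = false := by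
        simp only [PySem.Chars.isupper, Bool.and_eq_false_iff, decide_eq_false_iff_not]
        right
        intro hle
        have hZ : ('Z' : Char).toNat = 90 := by decide
        have := pvCharLe.mp hle
        rw [hd, hZ] at this
        omega
      have hlo : PySem.Chars.islower (Char.ofNat m) = true := by
        simp only [PySem.Chars.islower, Bool.and_eq_true, decide_eq_true_eq]
        exact ⟨pvCharLe.mpr (by rw [hd]; exact hmb.1), pvCharLe.mpr (by rw [hd]; exact hmb.2)⟩
      have hal : PySem.Chars.isalpha (Char.ofNat m) = true := by
        simp [PySem.Chars.isalpha, hlo]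
      rw [hA, hA']
      show pvRot1 (Char.ofNat m) = _
      simp only [pvRot1, hal, hup, if_true, if_false, Bool.false_eq_true, hd,
        PySem.Int.mod_eq_emod_of_pos (show (0:Int) < 26 by norm_num)]
      congr 1
      have hmi : (m : Int) = r + 97 := by omega
      rw [hmi]
      omega
  · have hna : PySem.Chars.isalpha c = false := by
      cases hx : PySem.Chars.isalpha c
      · rfl
      · exact absurd hx h
    simp [pvRot1, pvDecCharA, hna]

-- A's inner loop (string built by repeated append) is a map over the characters
theorem pvFoldA_eq_map (shift : Int) (cs : List Char) (acc : List Char) :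
    cs.foldl (fun acc c => acc ++ [pvDecCharA shift c]) acc = acc ++ cs.map (pvDecCharA shift) := by
  induction cs generalizing acc with
  | nil => simp
  | cons c cs ih => simp [List.foldl, ih]

-- invariant: A's outer foldl over pyRange a..a+n equals res ++ B's recursion started
-- at shift a on the original text mapped by pvDecCharA a
theorem pvFold_inv (n : Nat) : ∀ (a : Int) (res : List (Int × String)) (cs : List Char),
    (PySem.List.pyRange a (a + n) 1).foldl
      (fun results shift =>
        results ++ [(shift, String.ofList (cs.foldl (fun acc c => acc ++ [pvDecCharA shift c]) []))])
      res
    = res ++ pvGo n a (cs.map (pvDecCharA a)) := by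
  induction n with
  | zero =>
    intro a res cs
    rw [show a + ((0:Nat):Int) = a by push_cast; ring, PySem.List.pyRange_one_eq_nil le_rfl]
    simp [pvGo]
  | succ n ih =>
    intro a res cs
    have hlt : a < a + (((n:Nat) + 1 : Nat) : Int) := by push_cast; omega
    rw [PySem.List.pyRange_one_cons hlt]
    simp only [List.foldl]
    have hfold : cs.foldl (fun acc c => acc ++ [pvDecCharA a c]) [] = cs.map (pvDecCharA a) := by
      simpa using pvFoldA_eq_map a cs []
    have hstep : (cs.map (pvDecCharA a)).map pvRot1 = cs.map (pvDecCharA (a + 1)) := by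
      rw [List.map_map]
      exact List.map_congr_left (fun c _ => pvRot1_decCharA a c)
    have hrange : a + (((n:Nat) + 1 : Nat) : Int) = (a + 1) + ((n:Nat):Int) := by push_cast; ring
    rw [hfold, hrange, ih (a + 1) (res ++ [(a, String.ofList (cs.map (pvDecCharA a)))]) cs]
    simp [pvGo, ← hstep]

-- ===== VERDICT (by name: the statement is the Claim_ definition above) =====
theorem rot_bruteforce_spec : Claim_equal_rot_bruteforce := by
  intro text _
  unfold Spec_rot_bruteforce rot_bruteforce rot_bruteforce_alt
  have h := pvFold_inv 26 0 [] text.toList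
  have hz : text.toList.map (pvDecCharA 0) = text.toList := by
    rw [List.map_congr_left (fun c _ => pvDecCharA_zero c)]
    exact List.map_id _
  rw [hz] at h
  simpa using h
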